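-- pv_equiv track=rewrite | github.com/mamar828/Stage | summer_2023/HI_regions/shear_detection.py | get_point_groups
-- ===== SOURCE A (Python) =====
-- def get_point_groups(points: list, max_regroup_separation: int) -> list:
--     """
--     Give the bounds of every group in a list.
--
--     Arguments
--     ---------
--     points: list. Data that needs to be grouped.
--     max_regroup_separation: int. Maximum separation of two consecutive points that will be considered to belong to
--         the same signal drop section. This controls how many different regions will be outputted and will merge
--         those that are close.
--
--     Returns
--     -------
--     list: each element is a list containing the bounds of a group.
--     """
--     if list(points) != []:
--         groups = [[points[0], points[0]]]
--         for point in points[1:]: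
--             if groups[-1][1] + max_regroup_separation >= point:
--                 groups[-1][1] = point
--             else:
--                 groups.append([point, point])
--         return groups
-- ===== SOURCE B (Python) =====
-- def get_point_groups(points, max_regroup_separation):
--     if not points:
--         return None
--     cuts = [i + 1 for i, (a, b) in enumerate(zip(points, points[1:]))
--             if a + max_regroup_separation < b]
--     bounds = [0] + cuts + [len(points)]
--     return [[points[s], points[e - 1]] for s, e in zip(bounds, bounds[1:])]
-- ===== Notes on version B (the rewrite author's own statement) =====
-- stated objective: alternative
-- what changed: Instead of growing a list of groups and mutating the last group's upper bound element-by-element, B first computes the list of cut indices (where the gap exceeds the separation) in one pairwise pass, then builds each [first, last] interval from consecutive boundary indices in a second pass.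
import Mathlib
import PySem

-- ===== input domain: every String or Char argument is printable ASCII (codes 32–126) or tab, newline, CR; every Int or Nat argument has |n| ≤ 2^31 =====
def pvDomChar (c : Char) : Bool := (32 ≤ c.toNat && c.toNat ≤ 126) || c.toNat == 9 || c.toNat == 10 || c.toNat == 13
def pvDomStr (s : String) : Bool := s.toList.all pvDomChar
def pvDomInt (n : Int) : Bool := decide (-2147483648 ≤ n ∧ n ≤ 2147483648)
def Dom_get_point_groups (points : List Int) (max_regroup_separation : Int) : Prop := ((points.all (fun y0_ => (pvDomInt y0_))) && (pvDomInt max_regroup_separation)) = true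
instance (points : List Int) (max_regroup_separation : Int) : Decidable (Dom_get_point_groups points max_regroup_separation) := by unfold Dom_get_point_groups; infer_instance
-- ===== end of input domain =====

-- B replaces A's grow-and-mutate list of groups by a cut-index pass followed by an
-- interval-building pass over consecutive boundary indices (alternative decomposition,
-- same O(n) cost); return-value equivalence is proved for all inputs.

-- ===== PORT A =====
-- one body of A's for-loop: read groups[-1][1], either assign groups[-1][1] = point or append [point, point]
def pvA_step (sep : Int) (groups : List (List Int)) (point : Int) : List (List Int) :=
  if PySem.List.pyGetD (PySem.List.pyGetD groups (-1) []) 1 0 + sep ≥ point then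
    groups.dropLast ++ [(PySem.List.pyGetD groups (-1) []).set 1 point]
  else
    groups ++ [[point, point]]

def get_point_groups (points : List Int) (max_regroup_separation : Int) : Option (List (List Int)) :=
  if points ≠ [] then
    some ((PySem.List.slice points (some 1) none).foldl (pvA_step max_regroup_separation)
      [[PySem.List.pyGetD points 0 0, PySem.List.pyGetD points 0 0]])
  else
    none

-- ===== PORT B =====
-- cuts = [i + 1 for i, (a, b) in enumerate(zip(points, points[1:])) if a + sep < b]
def pvB_cuts (points : List Int) (sep : Int) : List Int :=
  (PySem.List.enumerate (points.zip (PySem.List.slice points (some 1) none))).filterMap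
    (fun iab => if iab.2.1 + sep < iab.2.2 then some (iab.1 + 1) else none)

-- [points[s], points[e - 1]]
def pvB_bound (points : List Int) (se : Int × Int) : List Int :=
  [PySem.List.pyGetD points se.1 0, PySem.List.pyGetD points (se.2 - 1) 0]

-- the nonempty-case body of B
def pvB_body (points : List Int) (sep : Int) : List (List Int) :=
  let bounds : List Int := 0 :: pvB_cuts points sep ++ [(points.length : Int)]
  (bounds.zip bounds.tail).map (pvB_bound points)

def get_point_groups_alt (points : List Int) (max_regroup_separation : Int) : Option (List (List Int)) :=
  if points = [] then none
  else some (pvB_body points max_regroup_separation)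

-- ===== PRECONDITION & SPEC =====
def Spec_get_point_groups (points : List Int) (max_regroup_separation : Int) (out : Option (List (List Int))) : Prop := out = get_point_groups_alt points max_regroup_separation
instance (points : List Int) (max_regroup_separation : Int) (out : Option (List (List Int))) : Decidable (Spec_get_point_groups points max_regroup_separation out) := by unfold Spec_get_point_groups; infer_instance

-- ===== CLAIM (what is proved, stated in full; the proofs are below) =====
def Claim_equal_get_point_groups : Prop := ∀ (points : List Int) (max_regroup_separation : Int), Dom_get_point_groups points max_regroup_separation → Spec_get_point_groups points max_regroup_separation (get_point_groups points max_regroup_separation)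

-- ===== LEMMAS AND PROOFS =====

-- the common recursive characterisation of the grouping: state (a, b) = current group's bounds
def pvChain (sep a b : Int) : List Int → List (List Int)
  | [] => [[a, b]]
  | p :: rest => if b + sep ≥ p then pvChain sep a p rest else [a, b] :: pvChain sep p p rest

-- replace the first component of the head group
def pvRH (a : Int) : List (List Int) → List (List Int)
  | [] => []
  | g :: gs => (a :: g.tail) :: gs

theorem pvChain_rh (sep : Int) : ∀ (rest : List Int) (a a' b : Int),
    pvRH a (pvChain sep a' b rest) = pvChain sep a b rest := by
  intro rest
  induction rest with
  | nil => intro a a' b; simp [pvChain, pvRH]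
  | cons p rest ih =>
    intro a a' b
    simp only [pvChain]
    by_cases h : b + sep ≥ p
    · rw [if_pos h, if_pos h, ih]
    · rw [if_neg h, if_neg h]; simp [pvRH]

theorem pvA_foldl (sep : Int) : ∀ (rest : List Int) (done : List (List Int)) (a b : Int),
    rest.foldl (pvA_step sep) (done ++ [[a, b]]) = done ++ pvChain sep a b rest := by
  intro rest
  induction rest with
  | nil => intro done a b; simp [pvChain]
  | cons p rest ih =>
    intro done a b
    simp only [List.foldl_cons, pvChain]
    by_cases h : b + sep ≥ p
    · rw [if_pos h]
      have hstep : pvA_step sep (done ++ [[a, b]]) p = done ++ [[a, p]] := by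
        simp [pvA_step, PySem.List.pyGetD_neg_one_append_singleton,
          PySem.List.pyGetD_ofNat', h]
      rw [hstep, ih done a p]
    · rw [if_neg h]
      have hstep : pvA_step sep (done ++ [[a, b]]) p = (done ++ [[a, b]]) ++ [[p, p]] := by
        simp [pvA_step, PySem.List.pyGetD_neg_one_append_singleton,
          PySem.List.pyGetD_ofNat', h]
      rw [hstep, ih (done ++ [[a, b]]) p p]
      simp

theorem pvEnum_shift {α : Type} : ∀ (l : List α) (s : Int),
    PySem.List.enumerate l (s + 1) = (PySem.List.enumerate l s).map (fun p => (p.1 + 1, p.2)) := by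
  intro l
  induction l with
  | nil => intro s; simp [PySem.List.enumerate_nil]
  | cons x xs ih =>
    intro s
    rw [PySem.List.enumerate_cons, PySem.List.enumerate_cons, List.map_cons]
    have : s + 1 + 1 = (s + 1) + 1 := by ring
    rw [this, ih (s + 1)]

theorem pvGetD_cons_succ {α : Type} (x : α) (xs : List α) (i : Int) (d : α) (h : 0 ≤ i) :
    PySem.List.pyGetD (x :: xs) (i + 1) d = PySem.List.pyGetD xs i d := by
  obtain ⟨n, rfl⟩ := Int.eq_ofNat_of_zero_le h
  have : (n : Int) + 1 = ((n + 1 : Nat) : Int) := by push_cast; ring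
  rw [this, PySem.List.pyGetD_natCast, PySem.List.pyGetD_natCast]
  simp [List.getD]

theorem pvCuts_pos (pts : List Int) (sep : Int) : ∀ e ∈ pvB_cuts pts sep, 1 ≤ e := by
  intro e he
  simp only [pvB_cuts, List.mem_filterMap] at he
  obtain ⟨iab, hmem, hf⟩ := he
  rw [PySem.List.mem_enumerate_iff] at hmem
  obtain ⟨k, hk, rfl⟩ := hmem
  split at hf
  · cases hf; omega
  · cases hf

theorem pvCuts_cons (p q : Int) (rest : List Int) (sep : Int) :
    pvB_cuts (p :: q :: rest) sep
      = (if p + sep < q then [1] else []) ++ (pvB_cuts (q :: rest) sep).map (· + 1) := by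
  simp only [pvB_cuts, PySem.List.slice_from_one, List.tail_cons, List.zip_cons_cons,
    PySem.List.enumerate_cons, pvEnum_shift, List.filterMap_cons, List.filterMap_map,
    List.map_filterMap]
  by_cases h : p + sep < q
  · rw [if_pos h, if_pos h]
    simp only [List.singleton_append]
    congr 1
    · norm_num
  · rw [if_neg h, if_neg h]
    simp

theorem pvB_shift (pts : List Int) (p : Int) (t u : List Int)
    (ht : ∀ s ∈ t, 0 ≤ s) (hu : ∀ e ∈ u, 1 ≤ e) :
    ((t.map (· + 1)).zip (u.map (· + 1))).map (pvB_bound (p :: pts))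
      = (t.zip u).map (pvB_bound pts) := by
  rw [List.zip_map, List.map_map]
  apply List.map_congr_left
  intro x hx
  obtain ⟨hs, he⟩ := List.of_mem_zip hx
  obtain ⟨s, e⟩ := x
  have hs0 : 0 ≤ s := ht s hs
  have he1 : 1 ≤ e := hu e he
  simp only [Function.comp_apply, Prod.map_apply, pvB_bound]
  rw [pvGetD_cons_succ p pts s 0 hs0]
  have h2 : e + 1 - 1 = (e - 1) + 1 := by ring
  rw [h2, pvGetD_cons_succ p pts (e - 1) 0 (by omega)]

theorem pvB_chain (sep : Int) : ∀ (rest : List Int) (p : Int),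
    pvB_body (p :: rest) sep = pvChain sep p p rest := by
  intro rest
  induction rest with
  | nil =>
    intro p
    simp [pvB_body, pvB_cuts, pvB_bound, pvChain, PySem.List.slice_from_one,
      PySem.List.enumerate_nil, PySem.List.pyGetD_zero_cons]
  | cons q rest ih =>
    intro p
    have hu1 : ∀ e ∈ pvB_cuts (q :: rest) sep ++ [((q :: rest).length : Int)], 1 ≤ e := by
      intro e he
      rcases List.mem_append.1 he with h1 | h1
      · exact pvCuts_pos _ _ _ h1
      · simp only [List.mem_singleton] at h1; subst h1; simp only [List.length_cons]; push_cast; omega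
    have ht0 : ∀ s ∈ (0 : Int) :: pvB_cuts (q :: rest) sep ++ [((q :: rest).length : Int)], 0 ≤ s := by
      intro s hs
      rcases List.mem_cons.1 hs with h1 | h1
      · omega
      · have := hu1 s h1; omega
    have hlen : (((p :: q :: rest).length : Nat) : Int) = ((q :: rest).length : Int) + 1 := by
      simp
    by_cases h : p + sep < q
    · -- a cut right after p: B emits [p, p] and shifts everything else by one
      have hb : pvB_body (p :: q :: rest) sep
          = pvB_bound (p :: q :: rest) (0, 1)
            :: ((((0 : Int) :: pvB_cuts (q :: rest) sep ++ [((q :: rest).length : Int)]).map (· + 1)).zip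
                ((pvB_cuts (q :: rest) sep ++ [((q :: rest).length : Int)]).map (· + 1))).map
              (pvB_bound (p :: q :: rest)) := by
        simp only [pvB_body, pvCuts_cons, if_pos h, hlen, List.map_cons,
          List.map_append, List.cons_append, List.zip_cons_cons, List.tail_cons]
        simp
      rw [hb, pvB_shift _ _ _ _ ht0 hu1]
      have hfst : pvB_bound (p :: q :: rest) (0, 1) = [p, p] := by
        simp [pvB_bound, PySem.List.pyGetD_zero_cons]
      have hbody : (((0 : Int) :: pvB_cuts (q :: rest) sep ++ [((q :: rest).length : Int)]).zip
            (pvB_cuts (q :: rest) sep ++ [((q :: rest).length : Int)])).map (pvB_bound (q :: rest))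
          = pvB_body (q :: rest) sep := rfl
      rw [hfst, hbody, ih q]
      simp only [pvChain]
      rw [if_neg (by omega : ¬ p + sep ≥ q)]
    · -- no cut: B's first group starts at p instead of q, the rest is unchanged
      cases hcu : pvB_cuts (q :: rest) sep ++ [((q :: rest).length : Int)] with
      | nil => simp at hcu
      | cons c u'' =>
        have hc1 : 1 ≤ c := hu1 c (by rw [hcu]; exact List.mem_cons_self ..)
        have hb : pvB_body (p :: q :: rest) sep
            = pvB_bound (p :: q :: rest) (0, c + 1)
              :: (((c :: u'').map (· + 1)).zip (u''.map (· + 1))).map (pvB_bound (p :: q :: rest)) := by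
          simp only [pvB_body]
          have hm : pvB_cuts (p :: q :: rest) sep ++ [(((p :: q :: rest).length : Nat) : Int)]
              = (c :: u'').map (· + 1) := by
            rw [pvCuts_cons, if_neg h, hlen, ← hcu]
            simp
          simp only [List.cons_append] at hm ⊢
          simp only [hm]
          simp
        have ht' : ∀ s ∈ (c :: u''), 0 ≤ s := by
          intro s hs
          have := hu1 s (by rw [hcu]; exact hs)
          omega
        have hu' : ∀ e ∈ u'', 1 ≤ e := by
          intro e he
          exact hu1 e (by rw [hcu]; exact List.mem_cons_of_mem _ he)
        rw [hb, pvB_shift _ _ _ _ ht' hu']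
        have hfst : pvB_bound (p :: q :: rest) (0, c + 1)
            = [p, PySem.List.pyGetD (q :: rest) (c - 1) 0] := by
          simp only [pvB_bound, PySem.List.pyGetD_zero_cons]
          have h2 : c + 1 - 1 = (c - 1) + 1 := by ring
          rw [h2, pvGetD_cons_succ _ _ _ _ (by omega)]
        have hbody : pvB_body (q :: rest) sep
            = [q, PySem.List.pyGetD (q :: rest) (c - 1) 0]
              :: ((c :: u'').zip u'').map (pvB_bound (q :: rest)) := by
          simp only [pvB_body]
          have hsnd : pvB_bound (q :: rest) (0, c) = [q, PySem.List.pyGetD (q :: rest) (c - 1) 0] := by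
            simp [pvB_bound, PySem.List.pyGetD_zero_cons]
          simp only [List.cons_append]
          rw [hcu]
          simp [hsnd]
        have hqq := ih q
        rw [hbody] at hqq
        have hrh := pvChain_rh sep rest p q q
        rw [← hqq] at hrh
        simp only [pvRH, List.tail_cons] at hrh
        rw [hfst]
        simp only [pvChain]
        rw [if_pos (by omega : p + sep ≥ q)]
        exact hrh

-- ===== VERDICT (by name: the statement is the Claim_ definition above) =====
theorem get_point_groups_spec : Claim_equal_get_point_groups := by
  intro points sep _
  unfold Spec_get_point_groups
  cases points with
  | nil => rfl
  | cons p rest =>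
    simp only [get_point_groups, get_point_groups_alt, PySem.List.slice_from_one, List.tail_cons,
      PySem.List.pyGetD_zero_cons, ne_eq, reduceCtorEq, not_false_iff, if_true, if_neg]
    have hA := pvA_foldl sep rest [] p p
    simp only [List.nil_append] at hA
    rw [hA, pvB_chain]
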